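-- pv_equiv track=rewrite | github.com/preventionpaca/grist-audit-cloud | main.py | mark_status_equip
-- ===== SOURCE A (Python) =====
-- def mark_status_equip(cur, diff):
--     """Ajoute rec.kind (added/changed/removed/normal) sur l'état courant depuis le diff."""
--     kind_map = {}
--     for d in (diff or []):
--         ct = d.get("changeType")
--         rid = d.get("id")
--         if ct == "ADDED_ROW":
--             kind_map[rid] = "added"
--         elif ct == "CHANGED_ROW":
--             kind_map[rid] = "changed"
--         elif ct == "REMOVED_ROW":
--             kind_map[rid] = "removed"
--     for r in (cur or []):
--         k = kind_map.get(r["id"], "normal")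
--         r["kind"] = k
--         r["status"] = "added" if k == "added" else ("changed" if k == "changed" else "normal")
--     return cur
-- ===== SOURCE B (Python) =====
-- KIND_BY_CHANGE = {"ADDED_ROW": "added", "CHANGED_ROW": "changed", "REMOVED_ROW": "removed"}
--
--
-- def mark_status_equip(cur, diff):
--     """Annotate current records from the diff by indexing cur and scanning the diff."""
--     recs = cur or []
--     # index each record id to the positions of the records carrying it
--     index = {}
--     for pos, r in enumerate(recs):
--         index.setdefault(r["id"], []).append(pos)
--     kinds = ["normal"] * len(recs)
--     # apply the diff in order; the last entry about an id wins
--     for d in (diff or []):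
--         k = KIND_BY_CHANGE.get(d.get("changeType"))
--         if k:
--             for pos in index.get(d.get("id"), []):
--                 kinds[pos] = k
--     for r, k in zip(recs, kinds):
--         r["kind"] = k
--         r["status"] = k if k in ("added", "changed") else "normal"
--     return cur
-- ===== Notes on version B (the rewrite author's own statement) =====
-- stated objective: alternative
-- what changed: B inverts the data flow: instead of building a kind_map over the diff and looking it up per current record, it indexes cur by id (id -> positions), initialises every kind to 'normal', then scans the diff once and overwrites the kinds of the indexed records, finishing with one zip pass.
-- outside the precondition, e.g. on mark_status_equip([{'name': 'x'}], None): A raises KeyError, B raises KeyError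
import Mathlib
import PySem

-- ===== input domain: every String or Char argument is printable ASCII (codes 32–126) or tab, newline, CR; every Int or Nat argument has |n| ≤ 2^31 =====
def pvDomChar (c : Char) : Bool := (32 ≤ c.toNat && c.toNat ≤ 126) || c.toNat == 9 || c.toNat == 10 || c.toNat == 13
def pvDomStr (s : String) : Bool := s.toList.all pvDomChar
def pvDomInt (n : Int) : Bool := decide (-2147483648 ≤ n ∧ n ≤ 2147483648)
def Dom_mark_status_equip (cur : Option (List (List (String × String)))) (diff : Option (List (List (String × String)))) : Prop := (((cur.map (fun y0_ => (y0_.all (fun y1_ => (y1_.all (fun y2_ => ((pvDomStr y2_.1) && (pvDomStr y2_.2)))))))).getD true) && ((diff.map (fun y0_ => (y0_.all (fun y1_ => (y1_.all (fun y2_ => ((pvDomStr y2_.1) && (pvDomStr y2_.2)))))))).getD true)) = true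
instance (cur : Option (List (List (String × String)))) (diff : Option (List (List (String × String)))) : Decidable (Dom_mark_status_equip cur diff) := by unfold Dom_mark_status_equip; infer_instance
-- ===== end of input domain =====

-- B builds an index from record id to the positions in cur and applies the diff by scanning it
-- once, instead of A's kind_map over the diff looked up per record; objective: alternative
-- (same asymptotic cost). Python A mutates the records of `cur` in place; the equivalence
-- proved here is about the RETURN value (B performs the same in-place mutation in Python).

-- ===== PORT A =====
-- d.get(k) on a record (dict[str,str] given as an assoc list)
def pvGet (r : List (String × String)) (k : String) : Option String :=
  (PySem.Dict.mk r).get? k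

-- r[k] = v on a record (overwrite in place, new keys append), back as an assoc list
def pvSet (r : List (String × String)) (k v : String) : List (String × String) :=
  ((PySem.Dict.mk r).insert k v).items

-- the first loop of A: kind_map built over the diff (rid may be None → key Option String)
def markA_step (km : PySem.Dict (Option String) String) (d : List (String × String)) :
    PySem.Dict (Option String) String :=
  let ct := pvGet d "changeType"
  let rid := pvGet d "id"
  if ct == some "ADDED_ROW" then km.insert rid "added"
  else if ct == some "CHANGED_ROW" then km.insert rid "changed"
  else if ct == some "REMOVED_ROW" then km.insert rid "removed"
  else km

-- the body of A's second loop (r["id"] raises KeyError when missing: excluded by Pre_,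
-- the port returns r unchanged there)
def markA_apply (km : PySem.Dict (Option String) String) (r : List (String × String)) :
    List (String × String) :=
  match pvGet r "id" with
  | none => r
  | some rid =>
      let k := km.getD (some rid) "normal"
      pvSet (pvSet r "kind" k) "status"
        (if k == "added" then "added" else if k == "changed" then "changed" else "normal")

def mark_status_equip (cur : Option (List (List (String × String)))) (diff : Option (List (List (String × String)))) : Option (List (List (String × String))) :=
  let km := (diff.getD []).foldl markA_step PySem.Dict.empty
  cur.map (fun xs => xs.map (markA_apply km))

-- ===== PORT B =====
-- KIND_BY_CHANGE.get(ct) (the 3-entry literal dict, ported as its lookup)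
def bKind? (ct : Option String) : Option String :=
  if ct == some "ADDED_ROW" then some "added"
  else if ct == some "CHANGED_ROW" then some "changed"
  else if ct == some "REMOVED_ROW" then some "removed"
  else none

-- index.setdefault(r["id"], []).append(pos)  (r["id"] raises when missing: excluded by Pre_)
def bIdxStep (d : PySem.Dict String (List Nat)) (p : List (String × String) × Nat) :
    PySem.Dict String (List Nat) :=
  match pvGet p.1 "id" with
  | none => d
  | some rid => d.modify rid [] (· ++ [p.2])

-- the diff loop of B: kinds[pos] = k for every indexed position of the id
def bDiffStep (index : PySem.Dict String (List Nat)) (kinds : Array String)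
    (d : List (String × String)) : Array String :=
  match bKind? (pvGet d "changeType") with
  | none => kinds
  | some k =>
      match pvGet d "id" with
      | none => kinds
      | some rid => (index.getD rid []).foldl (fun ks pos => ks.set! pos k) kinds

-- the final zip loop of B
def bFinish (r : List (String × String)) (k : String) : List (String × String) :=
  pvSet (pvSet r "kind" k) "status" (if k == "added" || k == "changed" then k else "normal")

def mark_status_equip_alt (cur : Option (List (List (String × String)))) (diff : Option (List (List (String × String)))) : Option (List (List (String × String))) :=
  let recs := cur.getD []
  let index := recs.zipIdx.foldl bIdxStep PySem.Dict.empty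
  let kinds := (diff.getD []).foldl (bDiffStep index) (Array.replicate recs.length "normal")
  cur.map (fun xs => (xs.zip kinds.toList).map (fun p => bFinish p.1 p.2))

-- ===== PRECONDITION & SPEC =====
-- Pre_ excludes exactly the inputs where A raises KeyError: a record of cur without an "id" key.
def Pre_mark_status_equip (cur : Option (List (List (String × String)))) (diff : Option (List (List (String × String)))) : Prop :=
  ∀ r ∈ cur.getD [], (pvGet r "id").isSome = true
instance (cur : Option (List (List (String × String)))) (diff : Option (List (List (String × String)))) : Decidable (Pre_mark_status_equip cur diff) := by unfold Pre_mark_status_equip; infer_instance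

def pvWitness_mark_status_equip : (Option (List (List (String × String)))) × (Option (List (List (String × String)))) :=
  (some [[("id", "7"), ("name", "x")], [("id", "8"), ("name", "y")]],
   some [[("changeType", "CHANGED_ROW"), ("id", "7")]])

def Spec_mark_status_equip (cur : Option (List (List (String × String)))) (diff : Option (List (List (String × String)))) (out : Option (List (List (String × String)))) : Prop := out = mark_status_equip_alt cur diff
instance (cur : Option (List (List (String × String)))) (diff : Option (List (List (String × String)))) (out : Option (List (List (String × String)))) : Decidable (Spec_mark_status_equip cur diff out) := by unfold Spec_mark_status_equip; infer_instance

-- ===== CLAIM (what is proved, stated in full; the proofs are below) =====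
def Claim_equal_mark_status_equip : Prop := ∀ (cur : Option (List (List (String × String)))) (diff : Option (List (List (String × String)))), Dom_mark_status_equip cur diff → Pre_mark_status_equip cur diff → Spec_mark_status_equip cur diff (mark_status_equip cur diff)

-- ===== LEMMAS AND PROOFS =====

-- Array.set! at i (in bounds) seen through getElem!
theorem pv_getElem!_set! (a : Array String) (p i : Nat) (k : String) (h : i < a.size) :
    (a.set! p k)[i]! = if i = p then k else a[i]! := by
  rcases eq_or_ne i p with rfl | hne
  · simp [Array.set!, Array.setIfInBounds, h]
  · simp only [Array.set!, Array.setIfInBounds]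
    split
    · simp [h, Ne.symm hne]
    · rfl

-- the inner write loop of B's diff pass, pointwise
theorem pv_foldl_set! (ps : List Nat) (a : Array String) (k : String) (i : Nat)
    (hi : i < a.size) :
    ((ps.foldl (fun ks pos => ks.set! pos k) a)[i]!) = if i ∈ ps then k else a[i]! := by
  induction ps generalizing a with
  | nil => simp
  | cons p ps ih =>
      simp only [List.foldl_cons, List.mem_cons]
      rw [ih (a.set! p k) (by simpa using hi), pv_getElem!_set! a p i k hi]
      by_cases h1 : i ∈ ps <;> by_cases h2 : i = p <;> simp [h1, h2]

theorem pv_foldl_set!_size (ps : List Nat) (a : Array String) (k : String) :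
    (ps.foldl (fun ks pos => ks.set! pos k) a).size = a.size := by
  induction ps generalizing a with
  | nil => rfl
  | cons p ps ih => simpa using ih (a.set! p k)

-- characterization of B's index: the positions recorded for id s, in order
theorem pv_index_getD (ps : List (List (String × String) × Nat))
    (d : PySem.Dict String (List Nat)) (s : String) :
    ((ps.foldl bIdxStep d).getD s []) =
      d.getD s [] ++ (ps.filter (fun p => pvGet p.1 "id" == some s)).map (·.2) := by
  induction ps generalizing d with
  | nil => simp
  | cons p ps ih =>
      simp only [List.foldl_cons, List.filter_cons]
      rw [ih (bIdxStep d p)]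
      unfold bIdxStep
      cases hid : pvGet p.1 "id" with
      | none => simp
      | some rid =>
          by_cases h : rid = s
          · subst h; simp
          · simp [PySem.Dict.getD_modify, h, Ne.symm h, beq_iff_eq]

theorem pv_index_mem (xs : List (List (String × String))) (s : String) (i : Nat) :
    i ∈ (xs.zipIdx.foldl bIdxStep PySem.Dict.empty).getD s [] ↔
      ∃ h : i < xs.length, pvGet xs[i] "id" = some s := by
  rw [pv_index_getD, PySem.Dict.getD_empty, List.nil_append, List.mem_map]
  constructor
  · rintro ⟨⟨r, j⟩, hmem, rfl⟩
    rw [List.mem_filter] at hmem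
    obtain ⟨hz, hf⟩ := hmem
    rw [List.mk_mem_zipIdx_iff_getElem?] at hz
    have hlt : j < xs.length := by
      by_contra hcon
      rw [List.getElem?_eq_none (by omega)] at hz
      simp at hz
    refine ⟨hlt, ?_⟩
    have : xs[j] = r := by simpa [List.getElem?_eq_getElem hlt] using hz
    simpa [this] using hf
  · rintro ⟨h, hid⟩
    refine ⟨(xs[i], i), ?_, rfl⟩
    rw [List.mem_filter]
    exact ⟨by rw [List.mk_mem_zipIdx_iff_getElem?]; simp [List.getElem?_eq_getElem h],
      by simp [hid]⟩

-- A's kind_map step, written through B's changeType table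
theorem pv_markA_step_eq (km : PySem.Dict (Option String) String)
    (d : List (String × String)) :
    markA_step km d =
      match bKind? (pvGet d "changeType") with
      | none => km
      | some k => km.insert (pvGet d "id") k := by
  simp only [markA_step, bKind?]
  split_ifs <;> rfl

-- main invariant: after both folds, B's kinds array reads as A's kind_map lookups
theorem pv_diff_invariant (xs : List (List (String × String)))
    (hpre : ∀ r ∈ xs, (pvGet r "id").isSome = true)
    (ds : List (List (String × String)))
    (km : PySem.Dict (Option String) String) (kinds : Array String)
    (hsz : kinds.size = xs.length)
    (hinv : ∀ i (hi : i < xs.length), kinds[i]! = km.getD (pvGet xs[i] "id") "normal") :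
    (ds.foldl (bDiffStep (xs.zipIdx.foldl bIdxStep PySem.Dict.empty)) kinds).size = xs.length ∧
    ∀ i (hi : i < xs.length),
      (ds.foldl (bDiffStep (xs.zipIdx.foldl bIdxStep PySem.Dict.empty)) kinds)[i]! =
        (ds.foldl markA_step km).getD (pvGet xs[i] "id") "normal" := by
  induction ds generalizing km kinds with
  | nil => exact ⟨hsz, hinv⟩
  | cons d ds ih =>
      simp only [List.foldl_cons]
      apply ih
      · -- size preserved by one bDiffStep
        unfold bDiffStep
        cases bKind? (pvGet d "changeType") with
        | none => exact hsz
        | some k =>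
            cases pvGet d "id" with
            | none => exact hsz
            | some rid => rw [pv_foldl_set!_size]; exact hsz
      · -- invariant preserved by one step
        intro i hi
        rw [pv_markA_step_eq]
        unfold bDiffStep
        cases hk : bKind? (pvGet d "changeType") with
        | none => exact hinv i hi
        | some k =>
            cases hdr : pvGet d "id" with
            | none =>
                rw [PySem.Dict.getD_insert_of_ne]
                · exact hinv i hi
                · have := hpre xs[i] (List.getElem_mem hi)
                  cases hx : pvGet xs[i] "id" with
                  | none => rw [hx] at this; simp at this
                  | some s => simp
            | some s =>
                rw [pv_foldl_set! _ _ _ _ (by rw [hsz]; exact hi)]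
                rw [PySem.Dict.getD_insert]
                by_cases hmem : i ∈ (xs.zipIdx.foldl bIdxStep PySem.Dict.empty).getD s []
                · have hx := (pv_index_mem xs s i).1 hmem
                  obtain ⟨_, hx⟩ := hx
                  simp [hmem, hx]
                · have hx : pvGet xs[i] "id" ≠ some s := by
                    intro h
                    exact hmem ((pv_index_mem xs s i).2 ⟨hi, h⟩)
                  simp [hmem, hx, hinv i hi]

-- A's per-record update equals B's finish on the looked-up kind
theorem pv_status_eq (k : String) :
    (if k == "added" then "added" else if k == "changed" then "changed" else "normal")
      = (if k == "added" || k == "changed" then k else "normal") := by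
  by_cases h1 : k = "added"
  · simp [h1]
  · by_cases h2 : k = "changed" <;> simp [h1, h2]

theorem pv_apply_eq_finish (km : PySem.Dict (Option String) String)
    (r : List (String × String)) (rid : String) (h : pvGet r "id" = some rid) :
    markA_apply km r = bFinish r (km.getD (some rid) "normal") := by
  unfold markA_apply bFinish
  rw [h]
  simp only [pv_status_eq]

theorem mark_status_equip_witness_ok :
    Dom_mark_status_equip (pvWitness_mark_status_equip.1) (pvWitness_mark_status_equip.2) ∧
    Pre_mark_status_equip (pvWitness_mark_status_equip.1) (pvWitness_mark_status_equip.2) := by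
  constructor <;> decide

-- ===== VERDICT (by name: the statement is the Claim_ definition above) =====
theorem mark_status_equip_spec : Claim_equal_mark_status_equip := by
  intro cur diff _ hpre
  unfold Spec_mark_status_equip mark_status_equip mark_status_equip_alt
  cases cur with
  | none => rfl
  | some xs =>
      simp only [Option.getD_some, Option.map_some]
      congr 1
      have hpre' : ∀ r ∈ xs, (pvGet r "id").isSome = true := by
        intro r hr; exact hpre r (by simpa using hr)
      obtain ⟨hsz, hinv⟩ := pv_diff_invariant xs hpre' (diff.getD [])
        PySem.Dict.empty (Array.replicate xs.length "normal")
        (by simp)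
        (by
          intro i hi
          rw [getElem!_pos _ _ (by simpa using hi)]
          simp)
      set kinds := (diff.getD []).foldl
        (bDiffStep (xs.zipIdx.foldl bIdxStep PySem.Dict.empty))
        (Array.replicate xs.length "normal") with hkinds
      apply List.ext_getElem
      · simp [hsz]
      · intro i hi1 hi2
        have hi : i < xs.length := by simpa using hi1
        simp only [List.getElem_map, List.getElem_zip]
        obtain ⟨rid, hrid⟩ := Option.isSome_iff_exists.1 (hpre' xs[i] (List.getElem_mem hi))
        rw [pv_apply_eq_finish _ _ _ hrid]
        have hk := hinv i hi
        rw [hrid] at hk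
        rw [← hk]
        have hb : i < kinds.size := by rw [hsz]; exact hi
        rw [getElem!_pos kinds i hb]
        simp
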